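-- pv_equiv track=rewrite | github.com/wang-C109156201/EEG-python | EEG_case.py | find_continuous_segments
-- ===== SOURCE A (Python) =====
-- def find_continuous_segments(time_list, min_len=20):
--     segments = []
--     current_segment = [time_list[0]]
--
--     for i in range(1, len(time_list)):
--         if time_list[i] - time_list[i - 1] <= 2:
--             current_segment.append(time_list[i])
--         else:
--             if len(current_segment) >= min_len:
--                 segments.append(current_segment)
--             current_segment = [time_list[i]]
--
--     if len(current_segment) >= min_len:
--         segments.append(current_segment)
--
--     return segments
-- ===== SOURCE B (Python) =====
-- def find_continuous_segments(time_list, min_len=20):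
--     n = len(time_list)
--     cuts = [0] + [i for i in range(1, n) if time_list[i] - time_list[i - 1] > 2] + [n]
--     return [time_list[a:b] for a, b in zip(cuts, cuts[1:]) if b - a >= min_len]
-- ===== Notes on version B (the rewrite author's own statement) =====
-- stated objective: alternative
-- what changed: A threads one accumulator loop that grows the current segment element by element; B first computes the list of cut positions (gap > 2) in one pass and then slices the input between consecutive cuts, keeping slices of length >= min_len.
import Mathlib
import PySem

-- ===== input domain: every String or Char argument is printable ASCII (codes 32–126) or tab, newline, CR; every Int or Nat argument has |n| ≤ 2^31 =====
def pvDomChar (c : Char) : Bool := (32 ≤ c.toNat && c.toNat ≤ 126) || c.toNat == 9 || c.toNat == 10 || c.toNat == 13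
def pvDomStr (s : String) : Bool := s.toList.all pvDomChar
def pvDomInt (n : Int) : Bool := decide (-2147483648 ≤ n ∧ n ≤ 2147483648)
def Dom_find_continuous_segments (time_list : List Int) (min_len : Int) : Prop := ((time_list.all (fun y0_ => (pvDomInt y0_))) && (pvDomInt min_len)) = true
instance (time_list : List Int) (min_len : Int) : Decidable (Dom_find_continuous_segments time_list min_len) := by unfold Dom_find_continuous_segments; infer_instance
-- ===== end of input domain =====

-- B replaces A's single accumulator loop by two phases: one pass collecting cut positions, then slicing between consecutive cuts (objective: alternative decomposition, same cost).

-- ===== PORT A =====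
def find_continuous_segments (time_list : List Int) (min_len : Int) : List (List Int) :=
  -- indexing the first element raises IndexError on an empty input; Pre_ excludes it
  let st := (PySem.List.pyRange 1 time_list.length 1).foldl
    (fun (st : List (List Int) × List Int) i =>
      if PySem.List.pyGetD time_list i 0 - PySem.List.pyGetD time_list (i - 1) 0 ≤ 2 then
        (st.1, st.2 ++ [PySem.List.pyGetD time_list i 0])
      else if (st.2.length : Int) ≥ min_len then
        (st.1 ++ [st.2], [PySem.List.pyGetD time_list i 0])
      else
        (st.1, [PySem.List.pyGetD time_list i 0]))
    ([], [PySem.List.pyGetD time_list 0 0])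
  if (st.2.length : Int) ≥ min_len then st.1 ++ [st.2] else st.1

-- ===== PORT B =====
def find_continuous_segments_alt (time_list : List Int) (min_len : Int) : List (List Int) :=
  let n : Int := time_list.length
  let cuts : List Int :=
    0 :: ((PySem.List.pyRange 1 n 1).filter
      (fun i => PySem.List.pyGetD time_list i 0 - PySem.List.pyGetD time_list (i - 1) 0 > 2)) ++ [n]
  (cuts.zip cuts.tail).filterMap
    (fun p => if p.2 - p.1 ≥ min_len then some (PySem.List.slice time_list (some p.1) (some p.2)) else none)

-- ===== PRECONDITION & SPEC =====
-- A unconditionally indexes the first element, so it raises IndexError exactly on the empty list.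
def Pre_find_continuous_segments (time_list : List Int) (min_len : Int) : Prop := time_list ≠ []
instance (time_list : List Int) (min_len : Int) : Decidable (Pre_find_continuous_segments time_list min_len) := by unfold Pre_find_continuous_segments; infer_instance
def pvWitness_find_continuous_segments : List Int × Int := ([1, 2, 3, 9], 2)

def Spec_find_continuous_segments (time_list : List Int) (min_len : Int) (out : List (List Int)) : Prop := out = find_continuous_segments_alt time_list min_len
instance (time_list : List Int) (min_len : Int) (out : List (List Int)) : Decidable (Spec_find_continuous_segments time_list min_len out) := by unfold Spec_find_continuous_segments; infer_instance

-- ===== CLAIM (what is proved, stated in full; the proofs are below) =====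
def Claim_equal_find_continuous_segments : Prop := ∀ (time_list : List Int) (min_len : Int), Dom_find_continuous_segments time_list min_len → Pre_find_continuous_segments time_list min_len → Spec_find_continuous_segments time_list min_len (find_continuous_segments time_list min_len)

-- ===== LEMMAS AND PROOFS =====

def pvGapP (tl : List Int) : Int → Bool :=
  fun i => PySem.List.pyGetD tl i 0 - PySem.List.pyGetD tl (i - 1) 0 > 2
def pvCuts (tl : List Int) (j : Int) : List Int :=
  0 :: (PySem.List.pyRange 1 j 1).filter (pvGapP tl)
def pvSegStep (tl : List Int) (m : Int) : Int × Int → Option (List Int) :=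
  fun p => if p.2 - p.1 ≥ m then some (PySem.List.slice tl (some p.1) (some p.2)) else none
def pvSegs (tl : List Int) (m j : Int) : List (List Int) :=
  ((pvCuts tl j).zip (pvCuts tl j).tail).filterMap (pvSegStep tl m)
def pvStep (tl : List Int) (m : Int) : List (List Int) × List Int → Int → List (List Int) × List Int :=
  fun st i =>
    if PySem.List.pyGetD tl i 0 - PySem.List.pyGetD tl (i - 1) 0 ≤ 2 then
      (st.1, st.2 ++ [PySem.List.pyGetD tl i 0])
    else if (st.2.length : Int) ≥ m then
      (st.1 ++ [st.2], [PySem.List.pyGetD tl i 0])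
    else
      (st.1, [PySem.List.pyGetD tl i 0])

theorem pv_zip_snoc {α : Type} (l : List α) (x d : α) (h : l ≠ []) :
    (l ++ [x]).zip (l ++ [x]).tail = l.zip l.tail ++ [(l.getLastD d, x)] := by
  induction l with
  | nil => simp at h
  | cons a t ih =>
    cases t with
    | nil => simp
    | cons b t' =>
      simp only [List.cons_append, List.zip_cons_cons, List.tail_cons] at *
      rw [ih (by simp)]
      simp

theorem pv_cuts_lastD_lt (tl : List Int) (j : Int) (hj : 1 ≤ j) :
    0 ≤ (pvCuts tl j).getLastD 0 ∧ (pvCuts tl j).getLastD 0 < j := by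
  unfold pvCuts
  have hmem : ∀ y ∈ (PySem.List.pyRange 1 j 1).filter (pvGapP tl), 1 ≤ y ∧ y < j := by
    intro y hy
    have := (List.mem_filter.mp hy).1
    rw [PySem.List.mem_pyRange_one] at this
    omega
  cases hf : (PySem.List.pyRange 1 j 1).filter (pvGapP tl) with
  | nil => simp; omega
  | cons c t =>
    have hg : (c :: t).getLast (by simp) ∈ c :: t := List.getLast_mem _
    have hb := hmem _ (by rw [hf]; exact hg)
    have hL : (0 :: (c :: t)).getLastD 0 = (c :: t).getLast (by simp) := by
      simp [List.getLastD_eq_getLast?, List.getLast?_eq_some_getLast]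
    rw [hL]
    omega

theorem pv_slice_len (tl : List Int) (a j : Int) (ha : 0 ≤ a) (haj : a ≤ j)
    (hjn : j ≤ (tl.length : Int)) :
    ((PySem.List.slice tl (some a) (some j)).length : Int) = j - a := by
  rw [PySem.List.slice_toNat _ ha (by omega)]
  simp
  omega

theorem pv_slice_snoc (tl : List Int) (a j : Int) (ha : 0 ≤ a) (haj : a ≤ j)
    (hjn : j < (tl.length : Int)) :
    PySem.List.slice tl (some a) (some j) ++ [PySem.List.pyGetD tl j 0]
      = PySem.List.slice tl (some a) (some (j + 1)) := by
  rw [PySem.List.slice_toNat _ ha (by omega), PySem.List.slice_toNat _ ha (by omega)]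
  have h1 : (j + 1).toNat - a.toNat = (j.toNat - a.toNat) + 1 := by omega
  rw [h1, List.take_add_one]
  have h2 : (tl.drop a.toNat)[j.toNat - a.toNat]? = some (PySem.List.pyGetD tl j 0) := by
    rw [List.getElem?_drop]
    have h3 : a.toNat + (j.toNat - a.toNat) = j.toNat := by omega
    rw [h3, PySem.List.pyGetD_eq_getElem _ _ (by omega) (by omega)]
    exact List.getElem?_eq_getElem (by omega)
  rw [h2]
  rfl

theorem pv_slice_one (tl : List Int) (j : Int) (hj : 0 ≤ j) (hjn : j < (tl.length : Int)) :
    PySem.List.slice tl (some j) (some (j + 1)) = [PySem.List.pyGetD tl j 0] := by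
  rw [← pv_slice_snoc tl j j hj le_rfl hjn, PySem.List.slice_toNat _ hj hj]
  simp

theorem pv_cuts_succ (tl : List Int) (j : Int) (hj : 1 ≤ j) :
    pvCuts tl (j + 1) = if pvGapP tl j then pvCuts tl j ++ [j] else pvCuts tl j := by
  unfold pvCuts
  rw [PySem.List.pyRange_one_succ_right (by omega : (1:Int) ≤ j), List.filter_append]
  cases h : pvGapP tl j <;> simp [List.filter, h]

theorem pv_main (tl : List Int) (m : Int) (j : Int) (h1 : 1 ≤ j)
    (hn : j ≤ (tl.length : Int)) :
    (PySem.List.pyRange 1 j 1).foldl (pvStep tl m) ([], [PySem.List.pyGetD tl 0 0])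
      = (pvSegs tl m j, PySem.List.slice tl (some ((pvCuts tl j).getLastD 0)) (some j)) := by
  induction j, h1 using Int.le_induction with
  | base =>
    rw [PySem.List.pyRange_one_eq_nil le_rfl]
    have hc : pvCuts tl 1 = [0] := by
      unfold pvCuts
      rw [PySem.List.pyRange_one_eq_nil le_rfl]
      rfl
    have h01 : ((pvCuts tl 1).getLastD 0) = 0 := by rw [hc]; rfl
    rw [h01, show (1 : Int) = 0 + 1 from rfl, pv_slice_one tl 0 le_rfl (by omega)]
    simp [pvSegs, hc]
  | succ j hj ih =>
    have hjn : j < (tl.length : Int) := by omega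
    obtain ⟨hlc0, hlcj⟩ := pv_cuts_lastD_lt tl j hj
    rw [PySem.List.pyRange_one_succ_right (by omega : (1:Int) ≤ j), List.foldl_append,
      ih (by omega)]
    simp only [List.foldl]
    unfold pvStep
    cases hg : pvGapP tl j with
    | false =>
      have hcuts : pvCuts tl (j + 1) = pvCuts tl j := by
        rw [pv_cuts_succ tl j hj, if_neg (by simp [hg])]
      have hsegs : pvSegs tl m (j + 1) = pvSegs tl m j := by
        unfold pvSegs; rw [hcuts]
      have hga : PySem.List.pyGetD tl j 0 - PySem.List.pyGetD tl (j - 1) 0 ≤ 2 := by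
        unfold pvGapP at hg
        simp only [decide_eq_false_iff_not, not_lt] at hg
        omega
      rw [if_pos hga, hsegs, hcuts]
      exact congrArg _ (pv_slice_snoc tl _ j hlc0 (by omega) hjn)
    | true =>
      have hga : PySem.List.pyGetD tl j 0 - PySem.List.pyGetD tl (j - 1) 0 > 2 := by
        unfold pvGapP at hg
        simpa using hg
      have hzip := pv_zip_snoc (pvCuts tl j) j 0 (by unfold pvCuts; simp)
      have hcuts : pvCuts tl (j + 1) = pvCuts tl j ++ [j] := by
        rw [pv_cuts_succ tl j hj, if_pos hg]
      have hsegs : pvSegs tl m (j + 1)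
          = pvSegs tl m j ++ List.filterMap (pvSegStep tl m) [((pvCuts tl j).getLastD 0, j)] := by
        unfold pvSegs
        rw [hcuts, hzip, List.filterMap_append]
      have hlast : (pvCuts tl (j + 1)).getLastD 0 = j := by
        rw [hcuts]; simp
      rw [if_neg (by omega), hsegs, hlast, pv_slice_one tl j (by omega) hjn]
      have hlen := pv_slice_len tl ((pvCuts tl j).getLastD 0) j hlc0 (by omega) (by omega)
      simp only [pvSegStep, List.filterMap]
      by_cases hm : j - (pvCuts tl j).getLastD 0 ≥ m
      · rw [if_pos (by omega : ((PySem.List.slice tl (some ((pvCuts tl j).getLastD 0)) (some j)).length : Int) ≥ m),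
          if_pos (by omega : m ≤ j - (pvCuts tl j).getLastD 0)]
      · rw [if_neg (by omega : ¬ ((PySem.List.slice tl (some ((pvCuts tl j).getLastD 0)) (some j)).length : Int) ≥ m),
          if_neg (by omega : ¬ m ≤ j - (pvCuts tl j).getLastD 0)]
        simp

theorem pv_portA_eq (tl : List Int) (m : Int) :
    find_continuous_segments tl m
      = (let st := (PySem.List.pyRange 1 tl.length 1).foldl (pvStep tl m)
            ([], [PySem.List.pyGetD tl 0 0]);
         if (st.2.length : Int) ≥ m then st.1 ++ [st.2] else st.1) := rfl

theorem pv_portB_eq (tl : List Int) (m : Int) :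
    find_continuous_segments_alt tl m
      = ((pvCuts tl tl.length ++ [(tl.length : Int)]).zip
          (pvCuts tl tl.length ++ [(tl.length : Int)]).tail).filterMap (pvSegStep tl m) := rfl

-- ===== VERDICT (by name: the statement is the Claim_ definition above) =====
theorem find_continuous_segments_spec : Claim_equal_find_continuous_segments := by
  intro tl m _ hpre
  unfold Spec_find_continuous_segments
  have hn1 : 1 ≤ (tl.length : Int) := by
    cases tl with
    | nil => exact absurd rfl hpre
    | cons a t => simp
  obtain ⟨hlc0, hlcn⟩ := pv_cuts_lastD_lt tl tl.length hn1
  have hlen := pv_slice_len tl ((pvCuts tl tl.length).getLastD 0) tl.length hlc0 (by omega) le_rfl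
  rw [pv_portA_eq, pv_portB_eq, pv_main tl m tl.length hn1 le_rfl,
    pv_zip_snoc (pvCuts tl tl.length) (tl.length : Int) 0 (by unfold pvCuts; simp),
    List.filterMap_append]
  simp only [pvSegStep, List.filterMap]
  by_cases hm : m ≤ (tl.length : Int) - (pvCuts tl tl.length).getLastD 0
  · rw [if_pos (by omega : ((PySem.List.slice tl (some ((pvCuts tl tl.length).getLastD 0)) (some tl.length)).length : Int) ≥ m)]
    rw [if_pos hm]
    rfl
  · rw [if_neg (by omega : ¬ ((PySem.List.slice tl (some ((pvCuts tl tl.length).getLastD 0)) (some tl.length)).length : Int) ≥ m)]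
    rw [if_neg hm]
    simp only [List.append_nil]
    rfl
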